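-- pv_equiv track=rewrite | github.com/jeplanner/DailyPlanner | routes/inbox.py | _sanitize_labels
-- ===== SOURCE A (Python) =====
-- _MAX_LABELS_PER_ITEM = 16
--
-- _MAX_LABEL_LEN = 32
--
-- def _sanitize_labels(raw) -> list[str]:
--     """Normalise a labels patch from the client. Accepts a list of
--     strings; trims, lowercases, drops empties and over-length entries,
--     de-duplicates while preserving order, and caps the total. Returns
--     an empty list (which clears the column) for null/non-list input —
--     this is the user's intent when they unselect every chip."""
--     if not isinstance(raw, list):
--         return []
--     seen = set()
--     out: list[str] = []
--     for v in raw: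
--         if not isinstance(v, str):
--             continue
--         s = v.strip().lower()
--         if not s or len(s) > _MAX_LABEL_LEN:
--             continue
--         if s in seen:
--             continue
--         seen.add(s)
--         out.append(s)
--         if len(out) >= _MAX_LABELS_PER_ITEM:
--             break
--     return out
-- ===== SOURCE B (Python) =====
-- _MAX_LABELS_PER_ITEM = 16
--
-- _MAX_LABEL_LEN = 32
--
--
-- def _take_distinct(labels, budget):
--     """First-occurrence dedup with a cap, nub-style: take the head, purge
--     every later duplicate of it from the tail, recurse with one less slot.
--     No 'seen' set is ever maintained."""
--     if budget == 0 or not labels: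
--         return []
--     head = labels[0]
--     return [head] + _take_distinct([x for x in labels[1:] if x != head],
--                                    budget - 1)
--
--
-- def _sanitize_labels(raw) -> list[str]:
--     if not isinstance(raw, list):
--         return []
--     cleaned = [s for s in (v.strip().lower() for v in raw if isinstance(v, str))
--                if s and len(s) <= _MAX_LABEL_LEN]
--     return _take_distinct(cleaned, _MAX_LABELS_PER_ITEM)
-- ===== Notes on version B (the rewrite author's own statement) =====
-- stated objective: alternative
-- what changed: Replaces A's single stateful loop (seen-set + out-list + break at the cap) with a normalize/filter pass followed by a recursive nub: take the head, purge its later duplicates from the tail, and recurse with a decremented budget, so no seen set or dedup state is ever maintained.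
import Mathlib
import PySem

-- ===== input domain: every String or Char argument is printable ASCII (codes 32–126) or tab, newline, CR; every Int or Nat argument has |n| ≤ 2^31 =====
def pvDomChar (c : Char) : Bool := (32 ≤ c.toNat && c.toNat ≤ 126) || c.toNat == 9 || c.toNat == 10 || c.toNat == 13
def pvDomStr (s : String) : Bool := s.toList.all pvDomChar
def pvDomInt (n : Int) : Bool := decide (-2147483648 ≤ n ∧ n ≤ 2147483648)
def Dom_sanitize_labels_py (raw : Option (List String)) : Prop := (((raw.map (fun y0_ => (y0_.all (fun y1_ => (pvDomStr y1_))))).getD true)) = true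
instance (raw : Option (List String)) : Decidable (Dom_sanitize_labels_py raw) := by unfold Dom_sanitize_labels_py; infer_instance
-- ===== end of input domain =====

-- B replaces A's single stateful early-exit loop (seen set + append + break) with a
-- normalize/filter pass followed by a recursive nub that purges each taken head's
-- duplicates from the tail, decrementing a budget: a different algorithm, same results.


-- ===== PORT A =====
-- the 'for v in raw' loop with its two accumulators (seen, out) and the break at 16
def sanitizeLoopA : List String → PySem.Set String → List String → List String
  | [], _, out => out
  | v :: rest, seen, out =>
    let s := PySem.Str.lower (PySem.Str.strip v)
    if s = "" ∨ 32 < PySem.Str.len s then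
      sanitizeLoopA rest seen out
    else if s ∈ seen then
      sanitizeLoopA rest seen out
    else
      let out' := out ++ [s]
      if 16 ≤ out'.length then out' else sanitizeLoopA rest (PySem.Set.add seen s) out'

def sanitize_labels_py (raw : Option (List String)) : List String :=
  match raw with
  | none => []                       -- not isinstance(raw, list)
  | some xs => sanitizeLoopA xs PySem.Set.empty []

-- ===== PORT B =====
-- _take_distinct: take the head, purge its later duplicates from the tail, recurse on a budget
def takeDistinct : Nat → List String → List String
  | 0, _ => []
  | _ + 1, [] => []
  | k + 1, h :: t => h :: takeDistinct k (t.filter (fun x => x ≠ h))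

def sanitize_labels_py_alt (raw : Option (List String)) : List String :=
  match raw with
  | none => []
  | some xs =>
    let cleaned :=
      (xs.map (fun v => PySem.Str.lower (PySem.Str.strip v))).filter
        (fun s => !(decide (s = "")) && decide (PySem.Str.len s ≤ 32))
    takeDistinct 16 cleaned

-- ===== PRECONDITION & SPEC =====
def Spec_sanitize_labels_py (raw : Option (List String)) (out : List String) : Prop := out = sanitize_labels_py_alt raw
instance (raw : Option (List String)) (out : List String) : Decidable (Spec_sanitize_labels_py raw out) := by unfold Spec_sanitize_labels_py; infer_instance

-- ===== CLAIM (what is proved, stated in full; the proofs are below) =====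
def Claim_equal_sanitize_labels_py : Prop := ∀ (raw : Option (List String)), Dom_sanitize_labels_py raw → Spec_sanitize_labels_py raw (sanitize_labels_py raw)

-- ===== LEMMAS AND PROOFS =====

-- dedup relative to an already-seen accumulator (proof-only device)
def dedupRel : List String → List String → List String
  | [], _ => []
  | s :: r, acc => if s ∈ acc then dedupRel r acc else s :: dedupRel r (acc ++ [s])

-- dedupRel only depends on the accumulator via membership
theorem dedupRel_congr (ys : List String) :
    ∀ (a b : List String), (∀ t, t ∈ a ↔ t ∈ b) → dedupRel ys a = dedupRel ys b := by
  induction ys with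
  | nil => intro a b _; rfl
  | cons s r ih =>
    intro a b hab
    simp only [dedupRel]
    by_cases h : s ∈ a
    · rw [if_pos h, if_pos ((hab s).mp h)]; exact ih a b hab
    · rw [if_neg h, if_neg (fun hb => h ((hab s).mpr hb))]
      have : ∀ t, t ∈ a ++ [s] ↔ t ∈ b ++ [s] := by
        intro t; simp [hab t]
      rw [ih (a ++ [s]) (b ++ [s]) this]

-- purging h from the list equals recording h in the accumulator
theorem dedupRel_filter (r : List String) :
    ∀ (acc : List String) (h : String),
      dedupRel (r.filter (fun x => x ≠ h)) acc = dedupRel r (acc ++ [h]) := by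
  induction r with
  | nil => intro acc h; rfl
  | cons s r' ih =>
    intro acc h
    by_cases hs : s = h
    · subst hs
      rw [List.filter_cons, if_neg (by simp)]
      simp only [dedupRel]
      rw [if_pos (by simp : s ∈ acc ++ [s]), ih acc s]
    · rw [List.filter_cons, if_pos (by simp [hs])]
      simp only [dedupRel]
      by_cases hmem : s ∈ acc
      · rw [if_pos hmem, if_pos (by simp [hmem] : s ∈ acc ++ [h]), ih acc h]
      · rw [if_neg hmem, if_neg (by simp [hmem, hs] : ¬ s ∈ acc ++ [h])]
        rw [ih (acc ++ [s]) h]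
        congr 1
        exact dedupRel_congr r' ((acc ++ [s]) ++ [h]) ((acc ++ [h]) ++ [s])
          (by intro t; simp; tauto)

-- B's recursive nub is the truncated dedup
theorem takeDistinct_eq (k : Nat) (ys : List String) :
    takeDistinct k ys = List.take k (dedupRel ys []) := by
  induction k generalizing ys with
  | zero => simp [takeDistinct]
  | succ k ih =>
    cases ys with
    | nil => simp [takeDistinct, dedupRel]
    | cons h t =>
      simp only [takeDistinct, dedupRel]
      rw [if_neg (by simp)]
      rw [List.take_succ_cons, ih (t.filter (fun x => x ≠ h)), dedupRel_filter]

-- A's loop computes: already-collected labels, then the relative dedup of the remaining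
-- normalized-and-kept labels, truncated to what is left of the cap of 16.
theorem sanitizeLoopA_eq (xs : List String) :
    ∀ (seen : PySem.Set String) (out : List String),
      (∀ t, t ∈ seen ↔ t ∈ out) → out.length < 16 →
      sanitizeLoopA xs seen out =
        out ++ List.take (16 - out.length)
          (dedupRel ((xs.map (fun v => PySem.Str.lower (PySem.Str.strip v))).filter
            (fun s => !(decide (s = "")) && decide (PySem.Str.len s ≤ 32))) out) := by
  induction xs with
  | nil => intro seen out _ _; simp [sanitizeLoopA, dedupRel]
  | cons v rest ih =>
    intro seen out hseen hlen
    simp only [sanitizeLoopA, List.map_cons, List.filter_cons]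
    set s := PySem.Str.lower (PySem.Str.strip v) with hs
    by_cases hdrop : s = "" ∨ 32 < PySem.Str.len s
    · rw [if_pos hdrop]
      have : (!(decide (s = "")) && decide (PySem.Str.len s ≤ 32)) = false := by
        rcases hdrop with h | h
        · rw [decide_eq_true h]; rfl
        · rw [decide_eq_false (by omega : ¬ PySem.Str.len s ≤ 32), Bool.and_false]
      rw [this]
      exact ih seen out hseen hlen
    · rw [if_neg hdrop]
      push Not at hdrop
      have hkeep : (!(decide (s = "")) && decide (PySem.Str.len s ≤ 32)) = true := by
        rw [decide_eq_false hdrop.1, decide_eq_true hdrop.2]; rfl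
      rw [hkeep, if_pos rfl]
      simp only [dedupRel]
      by_cases hmem : s ∈ seen
      · rw [if_pos hmem, if_pos ((hseen s).mp hmem)]
        exact ih seen out hseen hlen
      · rw [if_neg hmem, if_neg (fun h => hmem ((hseen s).mpr h))]
        have htake : List.take (16 - out.length)
            (s :: dedupRel ((rest.map (fun v => PySem.Str.lower (PySem.Str.strip v))).filter
              (fun s => !(decide (s = "")) && decide (PySem.Str.len s ≤ 32))) (out ++ [s]))
            = s :: List.take (16 - (out ++ [s]).length)
              (dedupRel ((rest.map (fun v => PySem.Str.lower (PySem.Str.strip v))).filter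
                (fun s => !(decide (s = "")) && decide (PySem.Str.len s ≤ 32))) (out ++ [s])) := by
          have h1 : 16 - out.length = (16 - (out ++ [s]).length) + 1 := by
            simp; omega
          rw [h1, List.take_succ_cons]
        rw [htake]
        by_cases hfull : 16 ≤ (out ++ [s]).length
        · have h0 : 16 - (out ++ [s]).length = 0 := by simp at hfull ⊢; omega
          rw [if_pos hfull, h0, List.take_zero]
        · rw [if_neg hfull]
          have hseen' : ∀ t, t ∈ PySem.Set.add seen s ↔ t ∈ out ++ [s] := by
            intro t
            rw [PySem.Set.mem_add]
            simp [hseen t]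
          have hlen' : (out ++ [s]).length < 16 := by omega
          rw [ih (PySem.Set.add seen s) (out ++ [s]) hseen' hlen']
          simp

-- ===== VERDICT (by name: the statement is the Claim_ definition above) =====
theorem sanitize_labels_py_spec : Claim_equal_sanitize_labels_py := by
  unfold Claim_equal_sanitize_labels_py
  intro raw _
  unfold Spec_sanitize_labels_py sanitize_labels_py sanitize_labels_py_alt
  cases raw with
  | none => rfl
  | some xs =>
    simp only []
    rw [sanitizeLoopA_eq xs PySem.Set.empty [] (by simp [PySem.Set.empty]) (by simp),
        takeDistinct_eq]
    simp
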